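-- pv_equiv track=rewrite | github.com/WilliamTurner97/python_practice_questions | source-files/Havel-Hakimi.py | decrement_list
-- ===== SOURCE A (Python) =====
-- def decrement_list(l, x):
--     l2 = []
--     for e in range(len(l)):
--         if(e < x):
--             l2.append(l[e] - 1)
--         else:
--             l2.append(l[e])
--     return l2
-- ===== SOURCE B (Python) =====
-- def decrement_list(l, x):
--     k = max(0, min(x, len(l)))
--     return [v - 1 for v in l[:k]] + l[k:]
-- ===== Notes on version B (the rewrite author's own statement) =====
-- stated objective: simpler
-- what changed: Replaces the per-index loop with its comparison inside by a clamped split point k = max(0, min(x, len(l))): map v-1 over the prefix l[:k] and append the suffix l[k:] verbatim.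
import Mathlib
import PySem

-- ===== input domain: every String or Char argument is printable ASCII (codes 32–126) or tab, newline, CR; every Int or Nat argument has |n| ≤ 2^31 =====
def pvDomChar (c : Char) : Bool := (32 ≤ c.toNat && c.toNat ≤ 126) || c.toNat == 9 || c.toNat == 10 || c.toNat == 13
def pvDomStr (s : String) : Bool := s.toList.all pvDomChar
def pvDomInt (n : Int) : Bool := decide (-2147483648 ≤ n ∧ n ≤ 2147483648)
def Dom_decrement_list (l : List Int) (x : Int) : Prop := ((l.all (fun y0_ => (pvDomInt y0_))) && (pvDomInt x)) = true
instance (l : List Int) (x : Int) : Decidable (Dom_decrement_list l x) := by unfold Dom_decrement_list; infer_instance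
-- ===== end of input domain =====

-- B replaces A's per-index comparison loop by a clamped split point: decrement the prefix, copy the suffix (simpler decomposition).

-- ===== PORT A =====
def decrement_list (l : List Int) (x : Int) : List Int :=
  (PySem.List.pyRange 0 (l.length : Int) 1).foldl
    (fun l2 e =>
      if e < x then l2 ++ [PySem.List.pyGetD l e 0 - 1]
      else l2 ++ [PySem.List.pyGetD l e 0]) []

-- ===== PORT B =====
def decrement_list_alt (l : List Int) (x : Int) : List Int :=
  let k : Int := max 0 (min x (l.length : Int))
  (PySem.List.slice l none (some k)).map (fun v => v - 1) ++ PySem.List.slice l (some k) none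

-- ===== PRECONDITION & SPEC =====
def Spec_decrement_list (l : List Int) (x : Int) (out : List Int) : Prop := out = decrement_list_alt l x
instance (l : List Int) (x : Int) (out : List Int) : Decidable (Spec_decrement_list l x out) := by unfold Spec_decrement_list; infer_instance

-- ===== CLAIM (what is proved, stated in full; the proofs are below) =====
def Claim_equal_decrement_list : Prop := ∀ (l : List Int) (x : Int), Dom_decrement_list l x → Spec_decrement_list l x (decrement_list l x)

-- ===== LEMMAS AND PROOFS =====

theorem decrement_list_eq_map (l : List Int) (x : Int) :
    decrement_list l x =
      (PySem.List.pyRange 0 (l.length : Int) 1).map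
        (fun e => if e < x then PySem.List.pyGetD l e 0 - 1 else PySem.List.pyGetD l e 0) := by
  unfold decrement_list
  rw [show (fun (l2 : List Int) (e : Int) =>
        if e < x then l2 ++ [PySem.List.pyGetD l e 0 - 1] else l2 ++ [PySem.List.pyGetD l e 0])
      = fun l2 e => l2 ++ [if e < x then PySem.List.pyGetD l e 0 - 1 else PySem.List.pyGetD l e 0]
      from by funext l2 e; split_ifs <;> rfl]
  rw [PySem.List.foldl_append_singleton_eq_map]
  simp

theorem decrement_list_alt_eq (l : List Int) (x : Int) :
    decrement_list_alt l x =
      (l.take (max 0 (min x (l.length : Int))).toNat).map (fun v => v - 1)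
        ++ l.drop (max 0 (min x (l.length : Int))).toNat := by
  simp only [decrement_list_alt]
  have hk : max 0 (min x (l.length : Int)) = (((max 0 (min x (l.length : Int))).toNat : Nat) : Int) := by
    omega
  rw [hk, PySem.List.slice_to_natCast, PySem.List.slice_from_natCast]
  simp

-- ===== VERDICT (by name: the statement is the Claim_ definition above) =====
theorem decrement_list_spec : Claim_equal_decrement_list := by
  intro l x _
  unfold Spec_decrement_list
  rw [decrement_list_eq_map, decrement_list_alt_eq]
  set k : Nat := (max 0 (min x (l.length : Int))).toNat with hk
  have hkle : k ≤ l.length := by omega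
  apply List.ext_getElem
  · simp [PySem.List.length_pyRange_one]; omega
  · intro n h1 h2
    have hn : n < l.length := by
      simpa [PySem.List.length_pyRange_one] using h1
    rw [List.getElem_map, PySem.List.getElem_pyRange_one]
    simp only [zero_add, PySem.List.pyGetD_natCast, List.getD_eq_getElem?_getD,
      List.getElem?_eq_getElem hn, Option.getD_some]
    by_cases hlt : n < k
    · have hx : ((n : Int)) < x := by omega
      rw [if_pos hx, List.getElem_append_left (by simpa [hkle] using hlt),
        List.getElem_map, List.getElem_take]
    · have hx : ¬ ((n : Int) < x) := by omega
      rw [if_neg hx, List.getElem_append_right (by simpa [hkle] using hlt),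
        List.getElem_drop]
      simp [hkle]
      congr 1
      omega
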